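-- pv_equiv track=rewrite | github.com/SkylakeOfficial/Skylakes_Noob_Python_Work | prime sum.py | f
-- ===== SOURCE A (Python) =====
-- def isprime(n):
--     for i in range(2, n):
--         if n % i == 0:
--             return 0
--     return 1
--
-- def f(n):
--     sm = 0
--     t = 0
--     for i in range(n, 2, -1):
--         if t < 10 and isprime(i):
--             sm += i
--             t += 1
--     return sm
-- ===== SOURCE B (Python) =====
-- def _isprime_sqrt(m):
--     d = 2
--     while d * d <= m:
--         if m % d == 0:
--             return False
--         d += 1
--     return True
--
-- def f(n):
--     sm = 0
--     t = 0
--     i = n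
--     while i > 2 and t < 10:
--         if _isprime_sqrt(i):
--             sm += i
--             t += 1
--         i -= 1
--     return sm
-- ===== Notes on version B (the rewrite author's own statement) =====
-- stated objective: faster
-- what changed: B replaces A's full trial division up to i for every i in a scan of the whole range with trial division only up to sqrt(i) and a while loop that stops as soon as ten primes have been collected.
import Mathlib
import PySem

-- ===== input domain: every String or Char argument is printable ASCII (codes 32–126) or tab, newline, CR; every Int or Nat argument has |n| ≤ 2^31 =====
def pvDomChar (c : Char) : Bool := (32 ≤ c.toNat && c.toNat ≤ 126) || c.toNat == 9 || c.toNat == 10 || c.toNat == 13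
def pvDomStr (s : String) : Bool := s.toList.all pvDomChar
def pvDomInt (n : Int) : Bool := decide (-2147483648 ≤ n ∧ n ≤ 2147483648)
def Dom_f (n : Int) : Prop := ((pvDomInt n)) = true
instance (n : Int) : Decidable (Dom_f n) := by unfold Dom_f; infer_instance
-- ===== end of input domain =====

-- B changes the algorithm (trial division only up to √i, and the scan stops once ten
-- primes are found) while A scans the whole range with full trial division; same value.

-- ===== PORT A =====
-- loop of isprime: 'for i in range(2, n): if n % i == 0: return 0' then 'return 1'
def isprimeLoop (n : Int) : List Int → Int
  | [] => 1
  | i :: rest => if PySem.Int.mod n i = 0 then 0 else isprimeLoop n rest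

def isprime (n : Int) : Int := isprimeLoop n (PySem.List.pyRange 2 n 1)

def f (n : Int) : Int :=
  ((PySem.List.pyRange n 2 (-1)).foldl
    (fun (st : Int × Int) i =>
      if st.2 < 10 then
        if isprime i ≠ 0 then (st.1 + i, st.2 + 1) else st
      else st)
    (0, 0)).1

-- ===== PORT B =====
-- 'while d * d <= m: if m % d == 0: return False; d += 1' then 'return True'
def divLoop (m : Int) (d : Int) : Bool :=
  if d * d ≤ m then
    (if PySem.Int.mod m d = 0 then false else divLoop m (d + 1))
  else true
termination_by (m + 1 - d).toNat
decreasing_by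
  have hd : d ≤ d * d := by by_cases h : d ≤ 0 <;> nlinarith
  omega

def isprimeSqrt (m : Int) : Bool := divLoop m 2

-- 'while i > 2 and t < 10: …; i -= 1'
def fAltLoop (i sm t : Int) : Int :=
  if 2 < i ∧ t < 10 then
    (if isprimeSqrt i then fAltLoop (i - 1) (sm + i) (t + 1)
     else fAltLoop (i - 1) sm t)
  else sm
termination_by (i - 2).toNat
decreasing_by all_goals omega

def f_alt (n : Int) : Int := fAltLoop n 0 0

-- ===== PRECONDITION & SPEC =====
def Spec_f (n : Int) (out : Int) : Prop := out = f_alt n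
instance (n : Int) (out : Int) : Decidable (Spec_f n out) := by unfold Spec_f; infer_instance

-- ===== CLAIM (what is proved, stated in full; the proofs are below) =====
def Claim_equal_f : Prop := ∀ (n : Int), Dom_f n → Spec_f n (f n)

-- ===== LEMMAS AND PROOFS =====

-- A's inner loop returns nonzero iff no listed candidate divides n
theorem isprimeLoop_ne_zero (n : Int) (l : List Int) :
    isprimeLoop n l ≠ 0 ↔ ∀ i ∈ l, ¬ (i ∣ n) := by
  induction l with
  | nil => simp [isprimeLoop]
  | cons i rest ih =>
    simp only [isprimeLoop]
    by_cases h : PySem.Int.mod n i = 0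
    · have h' : i ∣ n := (PySem.Int.mod_eq_zero_iff_dvd n i).1 h
      rw [if_pos h]
      exact ⟨fun h0 => absurd rfl h0, fun hall => absurd h' (hall i (by simp))⟩
    · have h' : ¬ (i ∣ n) := fun hd => h ((PySem.Int.mod_eq_zero_iff_dvd n i).2 hd)
      rw [if_neg h, ih]
      simp [h']

theorem isprime_ne_zero (n : Int) :
    isprime n ≠ 0 ↔ ∀ i : Int, 2 ≤ i → i < n → ¬ (i ∣ n) := by
  rw [isprime, isprimeLoop_ne_zero]
  constructor
  · intro h i h2 hn
    exact h i (by rw [PySem.List.mem_pyRange_one]; omega)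
  · intro h i hi
    rw [PySem.List.mem_pyRange_one] at hi
    exact h i hi.1 hi.2

-- B's inner loop (started at any d ≥ 2) returns true iff no candidate ≥ d below √m divides m
theorem divLoop_true (m : Int) :
    ∀ d : Int, 2 ≤ d → (divLoop m d = true ↔ ∀ e : Int, d ≤ e → e * e ≤ m → ¬ (e ∣ m)) := by
  intro d hd
  fun_induction divLoop m d with
  | case1 d hle hmod =>
    have hm : d ∣ m := (PySem.Int.mod_eq_zero_iff_dvd m d).1 hmod
    exact ⟨fun hf => absurd hf (by simp), fun hall => absurd hm (hall d le_rfl hle)⟩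
  | case2 d hle hmod ih =>
    have hm : ¬ (d ∣ m) := fun hv => hmod ((PySem.Int.mod_eq_zero_iff_dvd m d).2 hv)
    rw [ih (by omega)]
    constructor
    · intro h e h1 h2
      rcases eq_or_lt_of_le h1 with rfl | h1
      · exact hm
      · exact h e (by omega) h2
    · intro h e h1 h2
      exact h e (by omega) h2
  | case3 d hgt =>
    constructor
    · intro _ e h1 h2 _
      nlinarith
    · intro _; rfl

-- the square-root bound loses nothing: a proper divisor yields one below the root
theorem prime_test_agree (m : Int) (hm : 3 ≤ m) :
    (isprime m ≠ 0) ↔ isprimeSqrt m = true := by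
  rw [isprime_ne_zero, isprimeSqrt, divLoop_true m 2 le_rfl]
  constructor
  · intro h e h2 hsq
    exact h e h2 (by nlinarith)
  · intro h i h2 hlt hdvd
    obtain ⟨e, he⟩ := hdvd
    have he2 : 2 ≤ e := by
      by_cases h0 : e ≤ 0
      · nlinarith
      · by_cases h1 : e = 1
        · subst h1; omega
        · omega
    by_cases hii : i * i ≤ m
    · exact h i h2 hii ⟨e, he⟩
    · have hei : e < i := by nlinarith
      have hee : e * e ≤ m := by nlinarith
      exact h e he2 hee ⟨i, by rw [he]; ring⟩

-- once t has reached 10, A's fold never changes the state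
theorem foldl_stuck (l : List Int) (st : Int × Int) (h : ¬ st.2 < 10) :
    l.foldl
      (fun (st : Int × Int) i =>
        if st.2 < 10 then
          if isprime i ≠ 0 then (st.1 + i, st.2 + 1) else st
        else st) st = st := by
  induction l with
  | nil => rfl
  | cons i rest ih => simpa [List.foldl, if_neg h] using ih

-- A's fold over range(n, 2, -1) computes B's countdown loop
theorem loop_agree (n sm t : Int) :
    ((PySem.List.pyRange n 2 (-1)).foldl
      (fun (st : Int × Int) i =>
        if st.2 < 10 then
          if isprime i ≠ 0 then (st.1 + i, st.2 + 1) else st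
        else st) (sm, t)).1 = fAltLoop n sm t := by
  fun_induction fAltLoop n sm t with
  | case1 i sm t hc hp ih =>
    rw [PySem.List.pyRange_neg_one_cons (by omega : (2:Int) < i), List.foldl_cons]
    have hp' : isprime i ≠ 0 := (prime_test_agree i (by omega)).2 hp
    simpa [if_pos hc.2, if_pos hp'] using ih
  | case2 i sm t hc hp ih =>
    rw [PySem.List.pyRange_neg_one_cons (by omega : (2:Int) < i), List.foldl_cons]
    have hp' : ¬ isprime i ≠ 0 := by
      intro h; exact absurd ((prime_test_agree i (by omega)).1 h) (by simpa using hp)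
    simpa [if_pos hc.2, if_neg hp'] using ih
  | case3 i sm t hc =>
    rcases not_and_or.1 hc with h | h
    · rw [PySem.List.pyRange_neg_one_eq_nil (by omega)]; rfl
    · rw [foldl_stuck _ _ h]

-- ===== VERDICT (by name: the statement is the Claim_ definition above) =====
theorem f_spec : Claim_equal_f := by
  intro n _
  show f n = f_alt n
  rw [f, f_alt, loop_agree]
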